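-- pv_equiv track=rewrite | github.com/rayhankhan2192/Hunting_For_Exoplanets_With_AI_Nasa2025 | server/myapp/mergecsv.py | _canonical_column_order
-- ===== SOURCE A (Python) =====
-- PREFERRED_PREFIX = ["kepid", "kepoi_name", "kepler_name"]
--
-- def _canonical_column_order(all_cols: list[str]) -> list[str]:
--     """
--     Build a canonical order:
--     1) kepid, kepoi_name, kepler_name (if present)
--     2) koi_disposition (placed after kepler_name if both present)
--     3) koi_pdisposition (after koi_disposition if both present)
--     4) everything else sorted alphabetically
--     """
--     cols_set = set(all_cols)
--     ordered = []
--
--     # 1) Preferred prefix in order if present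
--     for c in PREFERRED_PREFIX:
--         if c in cols_set:
--             ordered.append(c)
--
--     # Remaining pool
--     remaining = [c for c in all_cols if c not in ordered]
--
--     # 2) Ensure koi_disposition position relative to kepler_name and koi_pdisposition
--     # First, pull koi_disposition and koi_pdisposition out of remaining (if present)
--     kd_present = "koi_disposition" in remaining
--     kpd_present = "koi_pdisposition" in remaining
--
--     if kd_present:
--         remaining.remove("koi_disposition")
--     if kpd_present:
--         remaining.remove("koi_pdisposition")
--
--     # Insert koi_disposition after kepler_name if kepler_name already placed
--     if kd_present:
--         if "kepler_name" in ordered: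
--             insert_at = ordered.index("kepler_name") + 1
--             ordered.insert(insert_at, "koi_disposition")
--         else:
--             # if kepler_name not present, just append early
--             ordered.append("koi_disposition")
--
--     # Then koi_pdisposition after koi_disposition (if both), else later
--     if kpd_present:
--         if "koi_disposition" in ordered:
--             insert_at = ordered.index("koi_disposition") + 1
--             ordered.insert(insert_at, "koi_pdisposition")
--         else:
--             ordered.append("koi_pdisposition")
--
--     # 4) Everything else sorted
--     tail = sorted([c for c in remaining if c not in ordered])
--     ordered.extend(tail)
--
--     # Finally ensure we didn't miss any (preserve original if any duplicates)
--     seen = set()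
--     final = []
--     for c in ordered:
--         if c not in seen:
--             final.append(c)
--             seen.add(c)
--     for c in all_cols:
--         if c not in seen:
--             final.append(c)
--             seen.add(c)
--
--     return final
-- ===== SOURCE B (Python) =====
-- PREFERRED_PREFIX = ["kepid", "kepoi_name", "kepler_name"]
-- _PREF = PREFERRED_PREFIX + ["koi_disposition", "koi_pdisposition"]
--
-- def _canonical_column_order(all_cols: list[str]) -> list[str]:
--     # One key-driven sort of the distinct columns: preferred names by their
--     # fixed rank, everything else after them, alphabetically.
--     return sorted(set(all_cols),
--                   key=lambda c: (_PREF.index(c), "") if c in _PREF else (len(_PREF), c))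
-- ===== Notes on version B (the rewrite author's own statement) =====
-- stated objective: simpler
-- what changed: B replaces A's multi-phase assembly (prefix scan, pulling koi_disposition/koi_pdisposition out of the remainder, positional inserts, a sort of the leftovers and a two-pass dedup cleanup) by a single key-driven sort of the distinct columns, with the key ranking the five preferred names by fixed position and everything else after them alphabetically.
import Mathlib
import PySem

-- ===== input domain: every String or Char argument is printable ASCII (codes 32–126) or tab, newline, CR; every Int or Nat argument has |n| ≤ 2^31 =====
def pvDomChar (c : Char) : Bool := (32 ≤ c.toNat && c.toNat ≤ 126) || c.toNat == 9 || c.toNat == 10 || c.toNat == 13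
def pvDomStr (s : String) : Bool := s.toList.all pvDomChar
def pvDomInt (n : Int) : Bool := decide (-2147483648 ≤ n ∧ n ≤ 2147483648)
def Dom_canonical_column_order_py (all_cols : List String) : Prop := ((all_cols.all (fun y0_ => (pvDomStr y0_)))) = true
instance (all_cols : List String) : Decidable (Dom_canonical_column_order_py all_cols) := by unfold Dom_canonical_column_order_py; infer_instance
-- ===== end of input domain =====

-- B rebuilds the order by one key-driven sort over the distinct columns instead of A's
-- multi-phase prefix assembly, positional inserts and dedup cleanup (objective: simpler).

-- ===== PORT A =====
def PREFERRED_PREFIX : List String := ["kepid", "kepoi_name", "kepler_name"]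

def pvDedupStep (p : PySem.Set String × List String) (c : String) : PySem.Set String × List String :=
  if c ∈ p.1 then p else (PySem.Set.add p.1 c, p.2 ++ [c])

def canonical_column_order_py (all_cols : List String) : List String :=
  let cols_set : PySem.Set String := PySem.Set.ofList all_cols
  let ordered := PREFERRED_PREFIX.foldl (fun ordered c => if c ∈ cols_set then ordered ++ [c] else ordered) []
  let remaining := all_cols.filter (fun c => decide (c ∉ ordered))
  let kd_present := "koi_disposition" ∈ remaining
  let kpd_present := "koi_pdisposition" ∈ remaining
  let remaining := if kd_present then (PySem.List.remove? remaining "koi_disposition").getD remaining else remaining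
  let remaining := if kpd_present then (PySem.List.remove? remaining "koi_pdisposition").getD remaining else remaining
  let ordered :=
    if kd_present then
      if "kepler_name" ∈ ordered then
        PySem.List.insert ordered (((PySem.List.index? ordered "kepler_name").getD 0 : Int) + 1) "koi_disposition"
      else ordered ++ ["koi_disposition"]
    else ordered
  let ordered :=
    if kpd_present then
      if "koi_disposition" ∈ ordered then
        PySem.List.insert ordered (((PySem.List.index? ordered "koi_disposition").getD 0 : Int) + 1) "koi_pdisposition"
      else ordered ++ ["koi_pdisposition"]
    else ordered
  let tl := PySem.List.sorted (remaining.filter (fun c => decide (c ∉ ordered))) (fun x => x) false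
  let ordered := ordered ++ tl
  let sf := ordered.foldl pvDedupStep (PySem.Set.empty, [])
  let sf := all_cols.foldl pvDedupStep sf
  sf.2


-- ===== PORT B =====
-- the key list of B: preferred prefix then the two disposition columns
def pvPREF : List String := PREFERRED_PREFIX ++ ["koi_disposition", "koi_pdisposition"]

def canonical_column_order_py_alt (all_cols : List String) : List String :=
  PySem.List.sorted2 (PySem.Set.ofList all_cols)
    (fun c => if c ∈ pvPREF then ((PySem.List.index? pvPREF c).getD 0 : Int) else PySem.List.len pvPREF)
    (fun c => if c ∈ pvPREF then "" else c) false

-- ===== PRECONDITION & SPEC =====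
def Spec_canonical_column_order_py (all_cols : List String) (out : List String) : Prop := out = canonical_column_order_py_alt all_cols
instance (all_cols : List String) (out : List String) : Decidable (Spec_canonical_column_order_py all_cols out) := by unfold Spec_canonical_column_order_py; infer_instance

-- ===== CLAIM (what is proved, stated in full; the proofs are below) =====
def Claim_equal_canonical_column_order_py : Prop := ∀ (all_cols : List String), Dom_canonical_column_order_py all_cols → Spec_canonical_column_order_py all_cols (canonical_column_order_py all_cols)

-- ===== LEMMAS AND PROOFS =====

theorem pvPrefix_foldl (xs : List String) (P : List String) : ∀ acc : List String,
    P.foldl (fun o c => if c ∈ PySem.Set.ofList xs then o ++ [c] else o) acc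
      = acc ++ P.filter (fun c => decide (c ∈ xs)) := by
  induction P with
  | nil => intro acc; simp
  | cons c P ih =>
      intro acc
      rw [List.foldl_cons]
      by_cases hc : c ∈ xs
      · rw [if_pos ((PySem.Set.mem_ofList _ _).mpr hc), ih]; simp [hc]
      · rw [if_neg (fun h => hc ((PySem.Set.mem_ofList _ _).mp h)), ih]; simp [hc]

theorem pvPrefix_foldl0 (xs : List String) :
    PREFERRED_PREFIX.foldl (fun o c => if c ∈ PySem.Set.ofList xs then o ++ [c] else o) []
      = PREFERRED_PREFIX.filter (fun c => decide (c ∈ xs)) := by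
  rw [pvPrefix_foldl, List.nil_append]

theorem pvInsert_after_last (pre : List String) (v w : String) (hv : v ∉ pre) :
    PySem.List.insert (pre ++ [v]) (((PySem.List.index? (pre ++ [v]) v).getD 0 : Int) + 1) w
      = (pre ++ [v]) ++ [w] := by
  rw [PySem.List.index?_append_singleton_self pre v hv, Option.getD_some]
  have h : ((pre.length : Int) + 1) = PySem.List.len (pre ++ [v]) := by
    simp [PySem.List.len_eq]
  rw [h, PySem.List.insert_len]

theorem pvErase_filter {α : Type} [BEq α] [LawfulBEq α] (p : α → Bool) (a : α)
    (ha : p a = false) : ∀ l : List α, (l.erase a).filter p = l.filter p := by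
  intro l
  induction l with
  | nil => rfl
  | cons x l ih =>
      by_cases hx : x = a
      · subst hx; rw [List.erase_cons_head]; simp [List.filter_cons, ha]
      · rw [List.erase_cons_tail (by simpa using hx)]
        simp only [List.filter_cons, ih]

-- split off the last present prefix element
theorem pvP3_split (xs : List String) (hk3 : "kepler_name" ∈ xs) :
    PREFERRED_PREFIX.filter (fun c => decide (c ∈ xs))
      = ["kepid", "kepoi_name"].filter (fun c => decide (c ∈ xs)) ++ ["kepler_name"] := by
  show (["kepid", "kepoi_name"] ++ ["kepler_name"]).filter _ = _
  rw [List.filter_append]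
  simp [hk3]


-- the two non-prefix special names are not in the filtered prefix
theorem pvKd_not_in_p3 (xs : List String) : "koi_disposition" ∉ PREFERRED_PREFIX.filter (fun c => decide (c ∈ xs)) := by
  intro h
  have := (List.mem_filter.mp h).1
  simp [PREFERRED_PREFIX] at this

theorem pvK3_not_in_p2 (xs : List String) : "kepler_name" ∉ ["kepid", "kepoi_name"].filter (fun c => decide (c ∈ xs)) := by
  intro h
  have := (List.mem_filter.mp h).1
  simp at this

-- the koi_disposition branch always appends at the end of the prefix
theorem pvKdBranch (xs : List String) :
    (if "kepler_name" ∈ PREFERRED_PREFIX.filter (fun c => decide (c ∈ xs)) then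
        PySem.List.insert (PREFERRED_PREFIX.filter (fun c => decide (c ∈ xs)))
          (((PySem.List.index? (PREFERRED_PREFIX.filter (fun c => decide (c ∈ xs))) "kepler_name").getD 0 : Int) + 1)
          "koi_disposition"
      else PREFERRED_PREFIX.filter (fun c => decide (c ∈ xs)) ++ ["koi_disposition"])
    = PREFERRED_PREFIX.filter (fun c => decide (c ∈ xs)) ++ ["koi_disposition"] := by
  by_cases hk3 : "kepler_name" ∈ xs
  · have hmem : "kepler_name" ∈ PREFERRED_PREFIX.filter (fun c => decide (c ∈ xs)) := by
      rw [List.mem_filter]; exact ⟨by simp [PREFERRED_PREFIX], by simpa using hk3⟩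
    rw [if_pos hmem, pvP3_split xs hk3, pvInsert_after_last _ _ _ (pvK3_not_in_p2 xs)]
  · rw [if_neg (fun h => hk3 (by simpa using (List.mem_filter.mp h).2))]

-- the filtered five-name prefix, split
theorem pvP5_filter (xs : List String) :
    pvPREF.filter (fun c => decide (c ∈ xs))
      = PREFERRED_PREFIX.filter (fun c => decide (c ∈ xs))
          ++ ["koi_disposition", "koi_pdisposition"].filter (fun c => decide (c ∈ xs)) := by
  show (PREFERRED_PREFIX ++ _).filter _ = _
  rw [List.filter_append]

-- collapsing the double filter on the tail
theorem pvTail (xs : List String) :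
    (xs.filter (fun c => decide (c ∉ PREFERRED_PREFIX))).filter
        (fun c => decide (c ∉ pvPREF.filter (fun c => decide (c ∈ xs))))
      = xs.filter (fun c => decide (c ∉ pvPREF)) := by
  rw [List.filter_filter]
  refine List.filter_congr ?_
  intro c hc
  by_cases hP3 : c ∈ PREFERRED_PREFIX
  · have hP5 : c ∈ pvPREF := by simp [pvPREF]; left; exact hP3
    simp [hP3, hP5]
  · by_cases h45 : c ∈ (["koi_disposition", "koi_pdisposition"] : List String)
    · have hP5 : c ∈ pvPREF := by simp [pvPREF]; simp at h45; tauto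
      have hf : c ∈ pvPREF.filter (fun c => decide (c ∈ xs)) := by
        rw [List.mem_filter]; exact ⟨hP5, by simpa using hc⟩
      simp [hf, hP5]
    · have hP5 : c ∉ pvPREF := by simp [pvPREF]; simp at hP3 h45; tauto
      have hf : c ∉ pvPREF.filter (fun c => decide (c ∈ xs)) := fun h => hP5 (List.mem_filter.mp h).1
      simp [hf, hP5, hP3]

theorem pvA_stage (xs : List String) :
    canonical_column_order_py xs
      = (xs.foldl pvDedupStep
          ((pvPREF.filter (fun c => decide (c ∈ xs))
              ++ PySem.List.sorted (xs.filter (fun c => decide (c ∉ pvPREF))) (fun x => x) false).foldl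
            pvDedupStep (PySem.Set.empty, []))).2 := by
  have hrem : xs.filter (fun c => decide (c ∉ PREFERRED_PREFIX.filter (fun c => decide (c ∈ xs))))
      = xs.filter (fun c => decide (c ∉ PREFERRED_PREFIX)) := by
    refine List.filter_congr ?_
    intro c hc
    simp [List.mem_filter, hc]
  conv_lhs => rw [canonical_column_order_py]
  rw [pvPrefix_foldl0, hrem]
  by_cases hkd : "koi_disposition" ∈ xs
  · have hkdr : "koi_disposition" ∈ xs.filter (fun c => decide (c ∉ PREFERRED_PREFIX)) := by
      simp [List.mem_filter, PREFERRED_PREFIX, hkd]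
    rw [if_pos hkdr, if_pos hkdr, PySem.List.remove?_eq_some_erase _ _ hkdr, Option.getD_some, pvKdBranch]
    by_cases hkpd : "koi_pdisposition" ∈ xs
    · have hkpdr : "koi_pdisposition" ∈ xs.filter (fun c => decide (c ∉ PREFERRED_PREFIX)) := by
        simp [List.mem_filter, PREFERRED_PREFIX, hkpd]
      have hkpde : "koi_pdisposition" ∈ (xs.filter (fun c => decide (c ∉ PREFERRED_PREFIX))).erase "koi_disposition" :=
        (List.mem_erase_of_ne (by decide)).mpr hkpdr
      have hmem2 : "koi_disposition" ∈ PREFERRED_PREFIX.filter (fun c => decide (c ∈ xs)) ++ ["koi_disposition"] := by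
        simp
      rw [if_pos hkpdr, if_pos hkpdr, PySem.List.remove?_eq_some_erase _ _ hkpde, Option.getD_some,
          if_pos hmem2, pvInsert_after_last _ _ _ (pvKd_not_in_p3 xs)]
      have e1 : (PREFERRED_PREFIX.filter (fun c => decide (c ∈ xs)) ++ ["koi_disposition"]) ++ ["koi_pdisposition"]
          = pvPREF.filter (fun c => decide (c ∈ xs)) := by
        rw [pvP5_filter]
        simp [hkd, hkpd]
      rw [e1]
      have e2 : List.filter (fun c => decide (c ∉ pvPREF.filter (fun c => decide (c ∈ xs))))
            (((xs.filter (fun c => decide (c ∉ PREFERRED_PREFIX))).erase "koi_disposition").erase "koi_pdisposition")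
          = xs.filter (fun c => decide (c ∉ pvPREF)) := by
        rw [pvErase_filter _ "koi_pdisposition" (by
              simp [List.mem_filter, pvPREF, PREFERRED_PREFIX, hkpd]),
            pvErase_filter _ "koi_disposition" (by
              simp [List.mem_filter, pvPREF, PREFERRED_PREFIX, hkd]),
            pvTail]
      rw [e2]
    · have hkpdrn : "koi_pdisposition" ∉ xs.filter (fun c => decide (c ∉ PREFERRED_PREFIX)) :=
        fun h => hkpd ((List.mem_filter.mp h).1)
      rw [if_neg hkpdrn, if_neg hkpdrn]
      have e1 : PREFERRED_PREFIX.filter (fun c => decide (c ∈ xs)) ++ ["koi_disposition"]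
          = pvPREF.filter (fun c => decide (c ∈ xs)) := by
        rw [pvP5_filter]
        simp [hkd, hkpd]
      rw [e1]
      have e2 : List.filter (fun c => decide (c ∉ pvPREF.filter (fun c => decide (c ∈ xs))))
            ((xs.filter (fun c => decide (c ∉ PREFERRED_PREFIX))).erase "koi_disposition")
          = xs.filter (fun c => decide (c ∉ pvPREF)) := by
        rw [pvErase_filter _ "koi_disposition" (by
              simp [List.mem_filter, pvPREF, PREFERRED_PREFIX, hkd]),
            pvTail]
      rw [e2]
  · have hkdrn : "koi_disposition" ∉ xs.filter (fun c => decide (c ∉ PREFERRED_PREFIX)) :=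
      fun h => hkd ((List.mem_filter.mp h).1)
    rw [if_neg hkdrn, if_neg hkdrn]
    by_cases hkpd : "koi_pdisposition" ∈ xs
    · have hkpdr : "koi_pdisposition" ∈ xs.filter (fun c => decide (c ∉ PREFERRED_PREFIX)) := by
        simp [List.mem_filter, PREFERRED_PREFIX, hkpd]
      rw [if_pos hkpdr, if_pos hkpdr, PySem.List.remove?_eq_some_erase _ _ hkpdr, Option.getD_some,
          if_neg (pvKd_not_in_p3 xs)]
      have e1 : PREFERRED_PREFIX.filter (fun c => decide (c ∈ xs)) ++ ["koi_pdisposition"]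
          = pvPREF.filter (fun c => decide (c ∈ xs)) := by
        rw [pvP5_filter]
        simp [hkd, hkpd]
      rw [e1]
      have e2 : List.filter (fun c => decide (c ∉ pvPREF.filter (fun c => decide (c ∈ xs))))
            ((xs.filter (fun c => decide (c ∉ PREFERRED_PREFIX))).erase "koi_pdisposition")
          = xs.filter (fun c => decide (c ∉ pvPREF)) := by
        rw [pvErase_filter _ "koi_pdisposition" (by
              simp [List.mem_filter, pvPREF, PREFERRED_PREFIX, hkpd]),
            pvTail]
      rw [e2]
    · have hkpdrn : "koi_pdisposition" ∉ xs.filter (fun c => decide (c ∉ PREFERRED_PREFIX)) :=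
        fun h => hkpd ((List.mem_filter.mp h).1)
      rw [if_neg hkpdrn, if_neg hkpdrn]
      have e1 : PREFERRED_PREFIX.filter (fun c => decide (c ∈ xs))
          = pvPREF.filter (fun c => decide (c ∈ xs)) := by
        rw [pvP5_filter]
        simp [hkd, hkpd]
      rw [e1, pvTail]

theorem pvOfList_sublist {α : Type} [BEq α] [LawfulBEq α] (l : List α) :
    (PySem.Set.ofList l).Sublist l := by
  induction l using List.reverseRecOn with
  | nil => simp [PySem.Set.ofList_nil]
  | append_singleton l x ih =>
      rw [PySem.Set.ofList_append_singleton]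
      by_cases hx : x ∈ PySem.Set.ofList l
      · rw [PySem.Set.add_of_mem hx]
        exact ih.trans (List.sublist_append_left l [x])
      · rw [PySem.Set.add_of_not_mem hx]
        exact ih.append_right _

theorem pvOfList_sorted_comm (R : List String) :
    PySem.Set.ofList (PySem.List.sorted R (fun x => x) false)
      = PySem.List.sorted (PySem.Set.ofList R) (fun x => x) false := by
  refine (PySem.List.sorted_eq_of_perm_of_pairwise_lt _ _ _ ?_ ?_).symm
  · rw [List.perm_ext_iff_of_nodup (PySem.Set.nodup_ofList _) (PySem.Set.nodup_ofList _)]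
    intro a
    rw [PySem.Set.mem_ofList, PySem.Set.mem_ofList, PySem.List.mem_sorted]
  · have hle : (PySem.Set.ofList (PySem.List.sorted R (fun x => x) false)).Pairwise (· ≤ ·) :=
      (PySem.List.sorted_pairwise R (fun x => x)).sublist (pvOfList_sublist _)
    have hne : (PySem.Set.ofList (PySem.List.sorted R (fun x => x) false)).Pairwise (· ≠ ·) :=
      PySem.Set.nodup_ofList _
    exact (hle.and hne).imp (fun h => lt_of_le_of_ne h.1 h.2)

theorem pvLoop1 (l : List String) : ∀ pfx : List String,
    l.foldl pvDedupStep (PySem.Set.ofList pfx, PySem.Set.ofList pfx)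
      = (PySem.Set.ofList (pfx ++ l), PySem.Set.ofList (pfx ++ l)) := by
  induction l with
  | nil => intro pfx; simp
  | cons c l ih =>
      intro pfx
      rw [List.foldl_cons]
      by_cases hc : c ∈ PySem.Set.ofList pfx
      · have h1 : pvDedupStep (PySem.Set.ofList pfx, PySem.Set.ofList pfx) c
            = (PySem.Set.ofList (pfx ++ [c]), PySem.Set.ofList (pfx ++ [c])) := by
          simp [pvDedupStep, hc, PySem.Set.ofList_append_singleton]
        rw [h1, ih (pfx ++ [c])]
        simp
      · have h1 : pvDedupStep (PySem.Set.ofList pfx, PySem.Set.ofList pfx) c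
            = (PySem.Set.ofList (pfx ++ [c]), PySem.Set.ofList (pfx ++ [c])) := by
          simp [pvDedupStep, hc, PySem.Set.ofList_append_singleton]
        rw [h1, ih (pfx ++ [c])]
        simp

theorem pvFinal (xs : List String) :
    (xs.foldl pvDedupStep
        ((pvPREF.filter (fun c => decide (c ∈ xs))
            ++ PySem.List.sorted (xs.filter (fun c => decide (c ∉ pvPREF))) (fun x => x) false).foldl
          pvDedupStep (PySem.Set.empty, []))).2
      = pvPREF.filter (fun c => decide (c ∈ xs))
          ++ PySem.List.sorted (PySem.Set.ofList (xs.filter (fun c => decide (c ∉ pvPREF)))) (fun x => x) false := by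
  have h0 : ((PySem.Set.empty : PySem.Set String), ([] : List String))
      = (PySem.Set.ofList [], PySem.Set.ofList []) := by
    simp [PySem.Set.empty_eq, PySem.Set.ofList_nil]
  rw [h0, pvLoop1, List.nil_append, pvLoop1]
  set ord2 := pvPREF.filter (fun c => decide (c ∈ xs)) with hord2
  set tl := PySem.List.sorted (xs.filter (fun c => decide (c ∉ pvPREF))) (fun x => x) false with htl
  have hsub : ∀ x ∈ xs, x ∈ ord2 ++ tl := by
    intro x hx
    rw [List.mem_append]
    by_cases hP : x ∈ pvPREF
    · exact Or.inl (List.mem_filter.mpr ⟨hP, by simpa using hx⟩)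
    · refine Or.inr ?_
      rw [htl, PySem.List.mem_sorted, List.mem_filter]
      exact ⟨hx, by simpa using hP⟩
  have hdrop : PySem.Set.ofList ((ord2 ++ tl) ++ xs) = PySem.Set.ofList (ord2 ++ tl) := by
    rw [PySem.Set.ofList_append, PySem.Set.update_eq_append_filter]
    have : List.filter (fun y => !(PySem.Set.ofList (ord2 ++ tl)).contains y) (PySem.Set.ofList xs) = [] := by
      rw [List.filter_eq_nil_iff]
      intro a ha
      have : a ∈ PySem.Set.ofList (ord2 ++ tl) :=
        (PySem.Set.mem_ofList _ _).mpr (hsub a ((PySem.Set.mem_ofList _ _).mp ha))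
      simp [PySem.Set.contains_iff, this]
    rw [this, List.append_nil]
  rw [hdrop]
  have hnod : ord2.Nodup := List.Nodup.filter _ (by decide)
  rw [PySem.Set.ofList_append, PySem.Set.update_eq_append_filter, PySem.Set.ofList_eq_self_of_nodup _ hnod]
  rw [htl, pvOfList_sorted_comm]
  have hfil : List.filter (fun y => !PySem.Set.contains ord2 y)
        (PySem.List.sorted (PySem.Set.ofList (xs.filter (fun c => decide (c ∉ pvPREF)))) (fun x => x) false)
      = PySem.List.sorted (PySem.Set.ofList (xs.filter (fun c => decide (c ∉ pvPREF)))) (fun x => x) false := by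
    rw [List.filter_eq_self]
    intro a ha
    have haP : a ∉ pvPREF := by
      have := (List.mem_filter.mp ((PySem.Set.mem_ofList _ _).mp ((PySem.List.mem_sorted _ _ _ _).mp ha))).2
      simpa using this
    have : a ∉ ord2 := fun h => haP (List.mem_filter.mp h).1
    simp [PySem.Set.contains_iff, this]
  rw [hfil]

theorem pvSorted2_eq_sorted_toLex {α : Type} (xs : List α) (k1 : α → Int) (k2 : α → String) :
    PySem.List.sorted2 xs k1 k2 false
      = PySem.List.sorted xs (fun x => toLex (k1 x, k2 x)) false := by
  show List.foldl _ [] xs = List.foldl _ [] xs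
  congr 1
  funext acc x
  congr 1
  funext a b
  rcases lt_trichotomy (k1 a) (k1 b) with h | h | h
  · simp [h, Prod.Lex.toLex_lt_toLex]
  · simp [h, Prod.Lex.toLex_lt_toLex, lt_irrefl]
  · have hne : k1 a ≠ k1 b := LT.lt.ne' h
    have hnl : ¬ k1 a < k1 b := lt_asymm h
    have hnle : ¬ k1 a ≤ k1 b := not_le_of_gt h
    simp [Prod.Lex.toLex_lt_toLex, hnl, hne, hnle]
def pvKey (c : String) : Lex (Int × String) :=
  toLex (if c ∈ pvPREF then ((PySem.List.index? pvPREF c).getD 0 : Int) else PySem.List.len pvPREF,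
         if c ∈ pvPREF then "" else c)

theorem pvIdx_lt (a : String) (ha : a ∈ pvPREF) : ((PySem.List.index? pvPREF a).getD 0 : Int) < 5 := by
  simp [pvPREF, PREFERRED_PREFIX] at ha
  rcases ha with rfl | rfl | rfl | rfl | rfl <;> decide

theorem pvPREF_pairwise : pvPREF.Pairwise (fun a b => pvKey a < pvKey b) := by
  decide

theorem pvB_eq (xs : List String) :
    canonical_column_order_py_alt xs
      = pvPREF.filter (fun c => decide (c ∈ xs))
        ++ PySem.List.sorted (PySem.Set.ofList (xs.filter (fun c => decide (c ∉ pvPREF)))) (fun x => x) false := by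
  unfold canonical_column_order_py_alt
  rw [pvSorted2_eq_sorted_toLex]
  apply PySem.List.sorted_eq_of_perm_of_pairwise_lt _ _ (fun c => pvKey c)
  · rw [List.perm_ext_iff_of_nodup ?nd (PySem.Set.nodup_ofList _)]
    case nd =>
      refine List.Nodup.append (List.filter_sublist.nodup (by decide))
        (((PySem.List.sorted_perm _ _ _).nodup_iff).mpr (PySem.Set.nodup_ofList _)) ?_
      intro a hal har
      have h1 : a ∈ pvPREF := (List.mem_filter.mp hal).1
      have h2 := (List.mem_filter.mp (PySem.Set.mem_ofList _ _ |>.mp ((PySem.List.mem_sorted _ _ _ _).mp har))).2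
      simp at h2; exact h2 h1
    intro a
    rw [PySem.Set.mem_ofList]
    by_cases hp : a ∈ pvPREF <;>
      simp [List.mem_append, List.mem_filter, PySem.List.mem_sorted, PySem.Set.mem_ofList, hp]
  · rw [List.pairwise_append]
    refine ⟨pvPREF_pairwise.sublist List.filter_sublist, ?_, ?_⟩
    · have hlt := PySem.List.sorted_ofList_pairwise_lt (xs.filter (fun c => decide (c ∉ pvPREF))) (κ := String)
      refine hlt.imp_of_mem ?_
      intro a b ha hb hab
      have hpa := (List.mem_filter.mp (PySem.Set.mem_ofList _ _ |>.mp ((PySem.List.mem_sorted _ _ _ _).mp ha))).2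
      have hpb := (List.mem_filter.mp (PySem.Set.mem_ofList _ _ |>.mp ((PySem.List.mem_sorted _ _ _ _).mp hb))).2
      simp at hpa hpb
      simp [pvKey, hpa, hpb, Prod.Lex.toLex_lt_toLex, hab]
    · intro a hal b hbr
      have h1 : a ∈ pvPREF := (List.mem_filter.mp hal).1
      have hpb := (List.mem_filter.mp (PySem.Set.mem_ofList _ _ |>.mp ((PySem.List.mem_sorted _ _ _ _).mp hbr))).2
      simp at hpb
      simp [pvKey, h1, hpb, Prod.Lex.toLex_lt_toLex]
      left
      simpa [PySem.List.len_eq, pvPREF, PREFERRED_PREFIX] using pvIdx_lt a h1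

theorem canonical_equal (all_cols : List String) :
    canonical_column_order_py all_cols = canonical_column_order_py_alt all_cols := by
  rw [pvA_stage, pvFinal, pvB_eq]

-- ===== VERDICT (by name: the statement is the Claim_ definition above) =====
theorem canonical_column_order_py_spec : Claim_equal_canonical_column_order_py := by
  intro all_cols _
  show _ = _
  exact canonical_equal all_cols
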